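-- pv_equiv track=rewrite | github.com/YQ-7/CodeInterviewGuide | c5_string/get_palindrome.py | get_palindrome_2
-- ===== SOURCE A (Python) =====
-- def get_palindrome_2(s, slps):
--     """
--     已知最大回文子串的情况下，求解s添加最少的字符串，使之变成回文
--     时间复杂度：O(N)
--     :param s:
--     :param slps: s的最大回文子串
--     """
--     if s is None or len(s) == 0:
--         return ""
--     # 整体回文串长度=2 * len(s)-len(slps)
--     res = [None] * (2 * len(s) - len(slps))
--     s_left = 0
--     s_right = len(s) - 1
--     slps_left = 0
--     slps_right = len(slps) - 1
--     res_left = 0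
--     res_right = len(res) - 1
--     # 以”剥洋葱“的方法，从外向内进行回文转换
--     while slps_left <= slps_right:
--         tmp_left = s_left
--         tmp_right = s_right
--         # 先定位slps对称字符在s中的位置
--         while s[s_left] != slps[slps_left]:
--             s_left += 1
--         while s[s_right] != slps[slps_right]:
--             s_right -= 1
--         # s[tmp_left..s_left] =
--         # s[s_right..tmp_right]
--         set_part(res, res_left, res_right, s, tmp_left, s_left, s_right, tmp_right)
--         res_left += s_left - tmp_left + tmp_right - s_right
--         res_right -= s_left - tmp_left + tmp_right - s_right
--         res[res_left] = s[s_left]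
--         res_left += 1
--         s_left += 1
--         res[res_right] = s[s_right]
--         res_right -= 1
--         s_right -= 1
--         slps_left += 1
--         slps_right -= 1
--     return "".join(res)
--
-- def set_part(res, res_l, res_r, s, ls, le, rs, re):
--     for i in range(ls, le):
--         res[res_l] = s[i]
--         res_l += 1
--         res[res_r] = s[i]
--         res_r -= 1
--     for i in range(re, rs, -1):
--         res[res_l] = s[i]
--         res_l += 1
--         res[res_r] = s[i]
--         res_r -= 1
-- ===== SOURCE B (Python) =====
-- def get_palindrome_2(s, slps):
--     if s is None or len(s) == 0:
--         return ""
--     # Build only the left half of the palindrome, then mirror it.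
--     i, j = 0, len(s) - 1
--     k, l = 0, len(slps) - 1
--     half = []
--     while k <= l:
--         i2 = s.index(slps[k], i)
--         j2 = s.rindex(slps[l], 0, j + 1)
--         half.append(s[i:i2])
--         half.append(s[j2 + 1:j + 1][::-1])
--         half.append(slps[k])
--         i, j, k, l = i2 + 1, j2 - 1, k + 1, l - 1
--     pre = "".join(half)
--     total = 2 * len(s) - len(slps)
--     return pre + pre[::-1][2 * len(pre) - total:]
-- ===== Notes on version B (the rewrite author's own statement) =====
-- stated objective: alternative
-- what changed: B replaces A's two-pointer in-place filling of a preallocated result array from both ends (with the symmetric double-writes of set_part) by building only the left half of the palindrome as string pieces located via str.index/str.rindex and then mirroring it (pre + reversed(pre) minus the overlap), which is correct because the result is a palindrome whenever slps is a palindromic subsequence.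
-- outside the precondition, e.g. on get_palindrome_2('ab', 'ab'): A returns 'ab', B returns 'aa'; on get_palindrome_2('ba', 'aa'): A returns 'aa', B returns 'ba'
import Mathlib
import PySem

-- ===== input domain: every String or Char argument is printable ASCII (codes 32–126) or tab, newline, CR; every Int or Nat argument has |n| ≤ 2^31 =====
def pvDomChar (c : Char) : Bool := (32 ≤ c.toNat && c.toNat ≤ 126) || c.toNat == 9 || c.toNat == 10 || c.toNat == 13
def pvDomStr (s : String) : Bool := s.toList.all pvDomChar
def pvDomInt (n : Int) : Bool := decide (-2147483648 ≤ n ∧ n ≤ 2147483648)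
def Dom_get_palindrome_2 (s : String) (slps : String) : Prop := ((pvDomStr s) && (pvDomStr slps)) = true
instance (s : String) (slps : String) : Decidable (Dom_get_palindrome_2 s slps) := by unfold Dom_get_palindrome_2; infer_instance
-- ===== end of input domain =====

-- B builds only the left half of the palindrome and mirrors it, instead of A's two-pointer
-- in-place filling of a preallocated array from both ends (objective: alternative algorithm).

-- ===== PORT A =====
-- while s[s_left] != c: s_left += 1   (pyGet? = none means IndexError: whole computation aborts)
def pvLocFwdA (S : List Char) (c : Char) : Nat → Int → Option Int
  | 0, _ => none
  | f + 1, i =>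
    match PySem.List.pyGet? S i with
    | none => none
    | some d => if d == c then some i else pvLocFwdA S c f (i + 1)

-- while s[s_right] != c: s_right -= 1
def pvLocBwdA (S : List Char) (c : Char) : Nat → Int → Option Int
  | 0, _ => none
  | f + 1, j =>
    match PySem.List.pyGet? S j with
    | none => none
    | some d => if d == c then some j else pvLocBwdA S c f (j - 1)

-- one write pair of set_part: res[res_l] = v; res_l += 1; res[res_r] = v; res_r -= 1
-- (reads/writes via pyGetD/pySetD are exact for the in-range indices reached under Pre_)
def pvPairStep (S : List Char) (st : List (Option Char) × Int × Int) (i : Int) :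
    List (Option Char) × Int × Int :=
  let v := PySem.List.pyGetD S i '?'
  (PySem.List.pySetD (PySem.List.pySetD st.1 st.2.1 (some v)) st.2.2 (some v),
   st.2.1 + 1, st.2.2 - 1)

-- def set_part(res, res_l, res_r, s, ls, le, rs, re)
def pvSetPartA (res : List (Option Char)) (res_l res_r : Int) (S : List Char)
    (ls le rs re : Int) : List (Option Char) :=
  let st1 := (PySem.List.pyRange ls le 1).foldl (pvPairStep S) (res, res_l, res_r)
  ((PySem.List.pyRange re rs (-1)).foldl (pvPairStep S) st1).1

-- the main while-loop of A (fuel bounds the number of iterations; under Pre_ it never runs out)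
def pvLoopA (S P : List Char) :
    Nat → Int → Int → Int → Int → Int → Int → List (Option Char) → Option (List (Option Char))
  | 0, _, _, _, _, _, _, _ => none
  | f + 1, s_left, s_right, slps_left, slps_right, res_left, res_right, res =>
    if slps_left ≤ slps_right then
      let tmp_left := s_left
      let tmp_right := s_right
      match pvLocFwdA S (PySem.List.pyGetD P slps_left '?') (2 * S.length + 2) s_left,
            pvLocBwdA S (PySem.List.pyGetD P slps_right '?') (2 * S.length + 2) s_right with
      | some s_left, some s_right =>
        let res := pvSetPartA res res_left res_right S tmp_left s_left s_right tmp_right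
        let res_left := res_left + (s_left - tmp_left) + (tmp_right - s_right)
        let res_right := res_right - (s_left - tmp_left) - (tmp_right - s_right)
        let res := PySem.List.pySetD res res_left (some (PySem.List.pyGetD S s_left '?'))
        let res := PySem.List.pySetD res res_right (some (PySem.List.pyGetD S s_right '?'))
        pvLoopA S P f (s_left + 1) (s_right - 1) (slps_left + 1) (slps_right - 1)
          (res_left + 1) (res_right - 1) res
      | _, _ => none
    else some res

def get_palindrome_2 (s : String) (slps : String) : String :=
  let S := s.toList
  let P := slps.toList
  if S.length = 0 then "" else
  let total : Nat := (2 * (S.length : Int) - (P.length : Int)).toNat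
  let res0 : List (Option Char) := List.replicate total none
  match pvLoopA S P (P.length + 1) 0 ((S.length : Int) - 1) 0 ((P.length : Int) - 1)
      0 ((total : Int) - 1) res0 with
  | none => ""          -- IndexError (outside Pre_)
  | some res =>
    match res.mapM id with   -- "".join(res): TypeError if a None is left (outside Pre_)
    | none => ""
    | some cs => String.ofList cs

-- ===== PORT B =====
-- s.index(c, i): first index ≥ i holding c (none = ValueError)
def pvIdxFrom (S : List Char) (c : Char) (i : Int) : Option Int :=
  ((S.drop i.toNat).findIdx? (· == c)).map (fun t => i + (t : Int))

-- s.rindex(c, 0, j+1): last index ≤ j holding c (none = ValueError)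
def pvRIdxTo (S : List Char) (c : Char) (j : Int) : Option Int :=
  (((S.take (j + 1).toNat).reverse).findIdx? (· == c)).map (fun t => j - (t : Int))

-- the while-loop of B: collect the pieces of the left half
def pvLoopB (S P : List Char) :
    Nat → Int → Int → Int → Int → List Char → Option (List Char)
  | 0, _, _, _, _, _ => none
  | f + 1, i, j, k, l, half =>
    if k ≤ l then
      match pvIdxFrom S (PySem.List.pyGetD P k '?') i,
            pvRIdxTo S (PySem.List.pyGetD P l '?') j with
      | some i2, some j2 =>
        pvLoopB S P f (i2 + 1) (j2 - 1) (k + 1) (l - 1)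
          (half ++ PySem.List.slice S (some i) (some i2)
                ++ (PySem.List.slice S (some (j2 + 1)) (some (j + 1))).reverse
                ++ [PySem.List.pyGetD P k '?'])
      | _, _ => none
    else some half

def get_palindrome_2_alt (s : String) (slps : String) : String :=
  let S := s.toList
  let P := slps.toList
  if S.length = 0 then "" else
  match pvLoopB S P (P.length + 1) 0 ((S.length : Int) - 1) 0 ((P.length : Int) - 1) [] with
  | none => ""          -- ValueError (outside Pre_)
  | some pre =>
    let total : Int := 2 * (S.length : Int) - (P.length : Int)
    String.ofList (pre ++ PySem.List.slice pre.reverse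
      (some (2 * (pre.length : Int) - total)) none)

-- ===== PRECONDITION & SPEC =====
-- Pre_ admits the documented contract (slps is a longest palindromic subsequence of s, the
-- docstring's ":param slps: s的最大回文子串"), plus the always-safe cases of an empty s and of a
-- single slps character occurring exactly once in s.  It excludes malformed slps, where A
-- raises IndexError/TypeError or returns an accidental value of its two-end overwrites.
def Pre_get_palindrome_2 (s : String) (slps : String) : Prop :=
  s.toList = [] ∨
  (slps.toList.length = 1 ∧ s.toList.count (slps.toList.headD ' ') = 1) ∨
  (slps.toList.reverse = slps.toList ∧ slps.toList ∈ s.toList.sublists ∧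
    ∀ t ∈ s.toList.sublists, t.reverse = t → t.length ≤ slps.toList.length)
instance (s : String) (slps : String) : Decidable (Pre_get_palindrome_2 s slps) := by
  unfold Pre_get_palindrome_2; infer_instance

def pvWitness_get_palindrome_2 : String × String := ("aab", "aa")

def Spec_get_palindrome_2 (s : String) (slps : String) (out : String) : Prop := out = get_palindrome_2_alt s slps
instance (s : String) (slps : String) (out : String) : Decidable (Spec_get_palindrome_2 s slps out) := by unfold Spec_get_palindrome_2; infer_instance

-- ===== CLAIM (what is proved, stated in full; the proofs are below) =====
def Claim_equal_get_palindrome_2 : Prop := ∀ (s : String) (slps : String), Dom_get_palindrome_2 s slps → Pre_get_palindrome_2 s slps → Spec_get_palindrome_2 s slps (get_palindrome_2 s slps)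

-- ===== LEMMAS AND PROOFS =====

-- the "onion" shape: the pattern peels off the window layer by layer, each layer delimited by
-- the first and last occurrence of its outer character, and the peeling consumes the window exactly
inductive PvGood : List Char → List Char → Prop
  | nil : PvGood [] []
  | single (U V : List Char) (c : Char) (hU : c ∉ U) (hV : c ∉ V) :
      PvGood (U ++ c :: V) [c]
  | step (U M V Q : List Char) (c : Char) (hU : c ∉ U) (hV : c ∉ V) (h : PvGood M Q) :
      PvGood (U ++ c :: (M ++ c :: V)) (c :: (Q ++ [c]))

-- the symmetric double-write: h goes in forward at res_l and mirrored at length-1-res_l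
def pvWriteSym : List (Option Char) → Int → List Char → List (Option Char)
  | res, _, [] => res
  | res, rl, c :: h =>
    pvWriteSym
      (PySem.List.pySetD (PySem.List.pySetD res rl (some c))
        ((res.length : Int) - 1 - rl) (some c)) (rl + 1) h


-- locate-loop specs ---------------------------------------------------------

theorem pvLocFwdA_spec (c : Char) (U : List Char) : ∀ (Pre Rest : List Char) (f : Nat),
    c ∉ U → U.length < f →
    pvLocFwdA (Pre ++ U ++ c :: Rest) c f (Pre.length : Int) =
      some ((Pre.length : Int) + U.length) := by
  induction U with
  | nil =>
    intro Pre Rest f _ hf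
    obtain ⟨f', rfl⟩ : ∃ f', f = f' + 1 := ⟨f - 1, by omega⟩
    rw [show Pre ++ [] ++ c :: Rest = Pre ++ c :: Rest from by simp]
    unfold pvLocFwdA
    rw [PySem.List.pyGet?_append_length]
    simp
  | cons u U ih =>
    intro Pre Rest f hU hf
    obtain ⟨f', rfl⟩ : ∃ f', f = f' + 1 := ⟨f - 1, by omega⟩
    simp only [List.mem_cons, not_or] at hU
    have hu : (u == c) = false := by
      simpa [beq_eq_false_iff_ne] using fun h => hU.1 h.symm
    rw [show Pre ++ u :: U ++ c :: Rest = Pre ++ u :: (U ++ c :: Rest) from by simp]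
    unfold pvLocFwdA
    rw [PySem.List.pyGet?_append_length]
    have hrec := ih (Pre ++ [u]) Rest f' hU.2 (by simp at hf ⊢; omega)
    rw [show Pre ++ [u] ++ U ++ c :: Rest = Pre ++ u :: (U ++ c :: Rest) from by simp] at hrec
    simp only [List.length_append, List.length_cons, List.length_nil] at hrec ⊢
    push_cast at hrec ⊢
    simp only [hu, Bool.false_eq_true, if_false]
    rw [hrec]
    congr 1
    ring

theorem pvLocBwdA_spec (c : Char) (V : List Char) : ∀ (Pre Rest : List Char) (f : Nat),
    c ∉ V → V.length < f →
    pvLocBwdA (Pre ++ c :: V ++ Rest) c f ((Pre.length : Int) + V.length) =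
      some (Pre.length : Int) := by
  induction V using List.reverseRecOn with
  | nil =>
    intro Pre Rest f _ hf
    obtain ⟨f', rfl⟩ : ∃ f', f = f' + 1 := ⟨f - 1, by omega⟩
    rw [show Pre ++ (c :: []) ++ Rest = Pre ++ c :: Rest from by simp]
    unfold pvLocBwdA
    simp only [List.length_nil, Nat.cast_zero, add_zero]
    rw [PySem.List.pyGet?_append_length]
    simp
  | append_singleton V v ih =>
    intro Pre Rest f hV hf
    obtain ⟨f', rfl⟩ : ∃ f', f = f' + 1 := ⟨f - 1, by omega⟩
    have hv : (v == c) = false := by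
      have : v ≠ c := fun h => hV (h ▸ (by simp : v ∈ V ++ [v]))
      simpa [beq_eq_false_iff_ne] using this
    have hVc : c ∉ V := fun h => hV (List.mem_append_left _ h)
    rw [show Pre ++ (c :: (V ++ [v])) ++ Rest = (Pre ++ c :: V) ++ v :: Rest from by simp]
    unfold pvLocBwdA
    rw [show (Pre.length : Int) + ((V ++ [v]).length : Int) = ((Pre ++ c :: V).length : Int) from by
      simp]
    rw [PySem.List.pyGet?_append_length]
    have hrec := ih Pre (v :: Rest) f' hVc (by simp at hf ⊢; omega)
    rw [show Pre ++ (c :: V) ++ v :: Rest = (Pre ++ c :: V) ++ v :: Rest from by simp] at hrec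
    simp only [hv, Bool.false_eq_true, if_false]
    rw [show ((Pre ++ c :: V).length : Int) - 1 = (Pre.length : Int) + V.length from by
      simp; push_cast; ring]
    exact hrec

theorem pvFindIdx_spec (c : Char) (U : List Char) (Rest : List Char) (hU : c ∉ U) :
    (U ++ c :: Rest).findIdx? (· == c) = some U.length := by
  induction U with
  | nil => simp [List.findIdx?_cons]
  | cons u U ih =>
    have hu : (u == c) = false := by
      simp only [List.mem_cons, not_or] at hU
      simp [beq_eq_false_iff_ne]
      exact fun h => hU.1 h.symm
    have hU' : c ∉ U := by simp only [List.mem_cons, not_or] at hU; exact hU.2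
    simp [List.findIdx?_cons, hu, ih hU']

theorem pvIdxFrom_spec (c : Char) (Pre U Rest : List Char) (hU : c ∉ U) :
    pvIdxFrom (Pre ++ U ++ c :: Rest) c (Pre.length : Int) =
      some ((Pre.length : Int) + U.length) := by
  unfold pvIdxFrom
  rw [show ((Pre.length : Int)).toNat = Pre.length from Int.toNat_natCast _]
  rw [show (Pre ++ U ++ c :: Rest) = Pre ++ (U ++ c :: Rest) from by simp]
  rw [List.drop_left]
  rw [pvFindIdx_spec c U Rest hU]
  rfl

theorem pvRIdxTo_spec (c : Char) (Pre V Rest : List Char) (hV : c ∉ V) :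
    pvRIdxTo (Pre ++ c :: V ++ Rest) c ((Pre.length : Int) + V.length) =
      some (Pre.length : Int) := by
  unfold pvRIdxTo
  have h1 : ((Pre.length : Int) + (V.length : Int) + 1).toNat = (Pre ++ c :: V).length := by
    simp; omega
  rw [h1]
  rw [show (Pre ++ c :: V ++ Rest) = (Pre ++ c :: V) ++ Rest from by simp]
  rw [List.take_left]
  have h2 : (Pre ++ c :: V).reverse = V.reverse ++ c :: Pre.reverse := by simp
  rw [h2, pvFindIdx_spec c V.reverse Pre.reverse (by simpa using hV)]
  simp only [List.length_reverse]
  norm_num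

-- pvWriteSym lemmas ----------------------------------------------------------

theorem pvWriteSym_length (h : List Char) : ∀ (res : List (Option Char)) (rl : Int),
    (pvWriteSym res rl h).length = res.length := by
  induction h with
  | nil => intro res rl; rfl
  | cons c h ih =>
    intro res rl
    simp only [pvWriteSym]
    rw [ih]
    simp [PySem.List.length_pySetD]

theorem pvWriteSym_append (h1 h2 : List Char) : ∀ (res : List (Option Char)) (rl : Int),
    pvWriteSym res rl (h1 ++ h2) = pvWriteSym (pvWriteSym res rl h1) (rl + h1.length) h2 := by
  induction h1 with
  | nil => intro res rl; simp [pvWriteSym]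
  | cons c h1 ih =>
    intro res rl
    simp only [List.cons_append, pvWriteSym]
    rw [ih]
    congr 1
    push_cast [List.length_cons]
    ring

theorem pvFold_pairStep (S : List Char) (xs : List Int) :
    ∀ (res : List (Option Char)) (rl : Int),
    xs.foldl (pvPairStep S) (res, rl, (res.length : Int) - 1 - rl) =
      (pvWriteSym res rl (xs.map (fun i => PySem.List.pyGetD S i '?')),
       rl + xs.length, (res.length : Int) - 1 - rl - xs.length) := by
  induction xs with
  | nil => intro res rl; simp [pvWriteSym]
  | cons x xs ih =>
    intro res rl
    set v := PySem.List.pyGetD S x '?' with hv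
    set res2 := PySem.List.pySetD (PySem.List.pySetD res rl (some v))
      ((res.length : Int) - 1 - rl) (some v) with hres2
    have hlen : res2.length = res.length := by
      simp [hres2, PySem.List.length_pySetD]
    have hstep : pvPairStep S (res, rl, (res.length : Int) - 1 - rl) x =
        (res2, rl + 1, (res2.length : Int) - 1 - (rl + 1)) := by
      simp only [pvPairStep, hlen, ← hv, ← hres2]
      refine Prod.ext rfl (Prod.ext rfl ?_)
      push_cast
      ring
    rw [List.foldl_cons, hstep, ih res2 (rl + 1)]
    have hws : pvWriteSym res rl ((x :: xs).map (fun i => PySem.List.pyGetD S i '?')) =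
        pvWriteSym res2 (rl + 1) (xs.map (fun i => PySem.List.pyGetD S i '?')) := by
      simp only [List.map_cons, pvWriteSym, ← hv, ← hres2]
    rw [← hws, hlen]
    refine Prod.ext rfl (Prod.ext ?_ ?_) <;> simp <;> push_cast <;> ring

theorem pvSegVals (Z : List Char) : ∀ (X Y : List Char),
    (PySem.List.pyRange (X.length : Int) ((X.length : Int) + Z.length) 1).map
      (fun i => PySem.List.pyGetD (X ++ Z ++ Y) i '?') = Z := by
  induction Z with
  | nil =>
    intro X Y
    simp [PySem.List.pyRange_one_eq_nil]
  | cons z Z ih =>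
    intro X Y
    simp only [List.append_assoc, List.cons_append, List.length_cons]
    rw [PySem.List.pyRange_one_cons (by push_cast; omega), List.map_cons]
    have hhead : PySem.List.pyGetD (X ++ z :: (Z ++ Y)) (X.length : Int) '?' = z := by
      rw [PySem.List.pyGetD_natCast]
      simp [List.getD_eq_getElem?_getD, List.getElem?_append_right]
    have hrec := ih (X ++ [z]) Y
    simp only [List.append_assoc, List.singleton_append, List.cons_append, List.nil_append, List.length_append,
      List.length_cons, List.length_nil] at hrec
    push_cast at hrec ⊢
    rw [show (X.length : Int) + ((Z.length : Int) + 1) = (X.length : Int) + 1 + (Z.length : Int) from by ring]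
    rw [hhead, hrec]

theorem pvSetSet_getElem? (res : List (Option Char)) (rl n2 : Nat) (c : Char)
    (hrl : rl < res.length) (hn2 : n2 < res.length) (t' : Nat) :
    ((res.set rl (some c)).set n2 (some c))[t']? =
      if t' = n2 then some (some c) else if t' = rl then some (some c) else res[t']? := by
  rw [List.getElem?_set, List.getElem?_set]
  simp only [List.length_set]
  by_cases h1 : t' = n2
  · rw [if_pos h1.symm, if_pos (by omega), if_pos h1]
  · rw [if_neg (fun hh : n2 = t' => h1 hh.symm), if_neg h1]
    by_cases h2 : t' = rl
    · rw [if_pos h2.symm, if_pos (by omega), if_pos h2]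
    · rw [if_neg (fun hh : rl = t' => h2 hh.symm), if_neg h2]

theorem pvWriteSym_getElem? (h : List Char) : ∀ (res : List (Option Char)) (rl : Nat),
    2 * (rl + h.length) ≤ res.length + 1 → ∀ (t : Nat),
    (pvWriteSym res (rl : Int) h)[t]? =
      if rl ≤ t ∧ t < rl + h.length then (h.map some)[t - rl]?
      else if res.length - rl - h.length ≤ t ∧ t < res.length - rl then
        (h.map some)[res.length - 1 - rl - t]?
      else res[t]? := by
  induction h with
  | nil =>
    intro res rl hb t
    simp only [pvWriteSym, List.length_nil, Nat.add_zero, List.map_nil]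
    rw [if_neg (by omega), if_neg (by omega)]
  | cons c h ih =>
    intro res rl hb t
    simp only [List.length_cons] at hb
    have hrl : rl < res.length := by omega
    have hL : pvWriteSym res (rl : Int) (c :: h) =
        pvWriteSym ((res.set rl (some c)).set (res.length - 1 - rl) (some c))
          ((rl + 1 : Nat) : Int) h := by
      simp only [pvWriteSym]
      rw [show PySem.List.pySetD res (rl : Int) (some c) = res.set rl (some c) from by simp]
      rw [show ((res.length : Int) - 1 - (rl : Int)) = ((res.length - 1 - rl : Nat) : Int)
        from by omega]
      rw [show PySem.List.pySetD (res.set rl (some c)) ((res.length - 1 - rl : Nat) : Int)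
            (some c) = (res.set rl (some c)).set (res.length - 1 - rl) (some c) from by simp]
      push_cast
      rfl
    have hlen2 : ((res.set rl (some c)).set (res.length - 1 - rl) (some c)).length
        = res.length := by simp
    rw [hL, ih _ (rl + 1) (by rw [hlen2]; omega) t, hlen2]
    have hres2t := pvSetSet_getElem? res rl (res.length - 1 - rl) c hrl (by omega)
    simp only [List.length_cons]
    by_cases A1 : rl ≤ t ∧ t < rl + (h.length + 1)
    · rw [if_pos A1]
      by_cases B1 : rl + 1 ≤ t ∧ t < rl + 1 + h.length
      · rw [if_pos B1, List.map_cons, show t - rl = (t - (rl + 1)) + 1 from by omega,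
          List.getElem?_cons_succ]
      · have ht : t = rl := by omega
        rw [if_neg B1]
        by_cases B2 : res.length - (rl + 1) - h.length ≤ t ∧ t < res.length - (rl + 1)
        · exfalso; omega
        · rw [if_neg B2, hres2t t]
          by_cases C : t = res.length - 1 - rl
          · rw [if_pos C, List.map_cons, show t - rl = 0 from by omega]
            simp
          · rw [if_neg C, if_pos ht, List.map_cons, show t - rl = 0 from by omega]
            simp
    · rw [if_neg A1]
      by_cases A2 : res.length - rl - (h.length + 1) ≤ t ∧ t < res.length - rl
      · rw [if_pos A2]
        by_cases B1 : rl + 1 ≤ t ∧ t < rl + 1 + h.length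
        · exfalso; omega
        · rw [if_neg B1]
          by_cases B2 : res.length - (rl + 1) - h.length ≤ t ∧ t < res.length - (rl + 1)
          · rw [if_pos B2, List.map_cons,
              show res.length - 1 - rl - t = (res.length - 1 - (rl + 1) - t) + 1 from by omega,
              List.getElem?_cons_succ]
          · have ht : t = res.length - 1 - rl := by omega
            rw [if_neg B2, hres2t t, if_pos ht, List.map_cons,
              show res.length - 1 - rl - t = 0 from by omega]
            simp
      · rw [if_neg A2]
        by_cases B1 : rl + 1 ≤ t ∧ t < rl + 1 + h.length
        · exfalso; omega
        · rw [if_neg B1]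
          by_cases B2 : res.length - (rl + 1) - h.length ≤ t ∧ t < res.length - (rl + 1)
          · exfalso; omega
          · rw [if_neg B2, hres2t t, if_neg (by omega), if_neg (by omega)]

theorem pvMapM_map_some (l : List (Option Char)) (cs : List Char) (h : l = cs.map some) :
    l.mapM id = some cs := by
  subst h
  induction cs with
  | nil => rfl
  | cons c cs ih => simp [List.mapM_cons, ih]

theorem pvJoinWriteSym (h : List Char) (K : Nat)
    (hK : 2 * h.length = K ∨ 2 * h.length = K + 1) :
    (pvWriteSym (List.replicate K (none : Option Char)) 0 h).mapM id =
      some (h ++ h.reverse.drop (2 * h.length - K)) := by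
  have hd : 2 * h.length - K ≤ h.length := by omega
  have hmain : pvWriteSym (List.replicate K (none : Option Char)) ((0 : Nat) : Int) h =
      (h ++ h.reverse.drop (2 * h.length - K)).map some := by
    apply List.ext_getElem?
    intro t
    rw [pvWriteSym_getElem? h _ 0 (by simp; omega) t]
    simp only [List.length_replicate]
    by_cases c1 : t < h.length
    · rw [if_pos ⟨Nat.zero_le t, by omega⟩]
      rw [List.map_append, List.getElem?_append_left (by simp; omega), Nat.sub_zero]
    · rw [if_neg (by omega)]
      by_cases c2 : t < K
      · rw [if_pos ⟨by omega, by omega⟩]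
        rw [List.map_append, List.getElem?_append_right (by simp; omega)]
        rw [List.map_drop, List.getElem?_drop, List.map_reverse,
          List.getElem?_reverse (by simp; omega)]
        congr 1
        simp only [List.length_map]
        omega
      · rw [if_neg (by omega)]
        rw [List.getElem?_eq_none_iff.mpr (by simp; omega),
          List.getElem?_eq_none_iff.mpr (by simp; omega)]
  rw [show (0 : Int) = ((0 : Nat) : Int) from rfl, hmain]
  exact pvMapM_map_some _ _ rfl

-- decomposition lemmas for PvGood --------------------------------------------

theorem pvFirstSplit (c : Char) (S : List Char) (h : c ∈ S) :
    ∃ U V, S = U ++ c :: V ∧ c ∉ U := by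
  induction S with
  | nil => cases h
  | cons a S ih =>
    by_cases hac : c = a
    · exact ⟨[], S, by simp [hac], by simp⟩
    · have : c ∈ S := by
        rcases List.mem_cons.mp h with h' | h'
        · exact absurd h' hac
        · exact h'
      obtain ⟨U, V, hUV, hcU⟩ := ih this
      exact ⟨a :: U, V, by simp [hUV], by simp [hcU, hac]⟩

theorem pvLastSplit (c : Char) (S : List Char) (h : c ∈ S) :
    ∃ U V, S = U ++ c :: V ∧ c ∉ V := by
  have h' : c ∈ S.reverse := by simpa using h
  obtain ⟨U, V, hUV, hcU⟩ := pvFirstSplit c S.reverse h'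
  refine ⟨V.reverse, U.reverse, ?_, by simpa using hcU⟩
  have := congrArg List.reverse hUV
  simpa using this

theorem pvPeelCons (c : Char) (U : List Char) : ∀ (rest X : List Char), c ∉ U →
    (c :: rest).Sublist (U ++ c :: X) → rest.Sublist X := by
  induction U with
  | nil =>
    intro rest X _ hsub
    exact List.cons_sublist_cons.mp hsub
  | cons u U ih =>
    intro rest X hU hsub
    simp only [List.mem_cons, not_or] at hU
    cases hsub with
    | cons _ h => exact ih rest X (by simp [hU.2]) h
    | cons₂ _ h => exact absurd rfl hU.1

theorem pvPalSplit (Q : List Char) (hp : Q.reverse = Q) (hl : 2 ≤ Q.length) :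
    ∃ c Q', Q = c :: (Q' ++ [c]) ∧ Q'.reverse = Q' := by
  obtain ⟨c, T, rfl⟩ : ∃ c T, Q = c :: T := by
    cases Q with
    | nil => simp at hl
    | cons c T => exact ⟨c, T, rfl⟩
  rcases T.eq_nil_or_concat with rfl | ⟨Q', d, rfl⟩
  · simp at hl
  · have hd : d = c := by
      have := congrArg (fun l => l.headD ' ') hp
      simpa using this
    subst hd
    have hq : Q'.reverse = Q' := by
      have := congrArg (fun l => l.tail.dropLast) hp
      simpa using this
    exact ⟨d, Q', by simp, hq⟩

theorem pvGood_of_count_one (c : Char) (S : List Char) (h : S.count c = 1) :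
    PvGood S [c] := by
  have hc : c ∈ S := List.count_pos_iff.mp (by omega)
  obtain ⟨U, V, rfl, hU⟩ := pvFirstSplit c S hc
  have hV : c ∉ V := by
    rw [List.count_append, List.count_cons_self] at h
    have hU0 : U.count c = 0 := List.count_eq_zero.mpr hU
    have : V.count c = 0 := by omega
    exact List.count_eq_zero.mp this
  exact PvGood.single U V c hU hV

theorem pvGood_of_max_aux : ∀ (n : Nat) (Q S : List Char), Q.length < n →
    Q.reverse = Q → Q.Sublist S →
    (∀ t : List Char, t.Sublist S → t.reverse = t → t.length ≤ Q.length) →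
    PvGood S Q := by
  intro n
  induction n with
  | zero => intro Q S h; omega
  | succ n ih =>
    intro Q S hlen hp hsub hmax
    by_cases hQ : Q = []
    · subst hQ
      cases S with
      | nil => exact PvGood.nil
      | cons s0 S' =>
        exfalso
        have := hmax [s0] (List.singleton_sublist.mpr (List.mem_cons_self)) (by simp)
        simp at this
    · by_cases hQ1 : Q.length = 1
      · obtain ⟨c, rfl⟩ : ∃ c, Q = [c] := by
          cases Q with
          | nil => simp at hQ1
          | cons c T =>
            cases T with
            | nil => exact ⟨c, rfl⟩
            | cons _ _ => simp at hQ1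
        have hc : c ∈ S := List.singleton_sublist.mp hsub
        have hcnt : S.count c = 1 := by
          have h1 : 1 ≤ S.count c := List.count_pos_iff.mpr hc
          by_contra hne
          have h2 : 2 ≤ S.count c := by omega
          have := hmax (List.replicate 2 c) (List.replicate_sublist_iff.mpr h2)
            (by simp [List.reverse_replicate])
          simp at this
        exact pvGood_of_count_one c S hcnt
      · obtain ⟨c, Q', rfl, hq'⟩ := pvPalSplit Q hp (by
          have : Q.length ≠ 0 := by simpa [List.length_eq_zero_iff] using hQ
          omega)
        have hQc : 2 ≤ (c :: (Q' ++ [c])).count c := by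
          simp [List.count_cons, List.count_append]
        have hSc : 2 ≤ S.count c := le_trans hQc (List.Sublist.count_le c hsub)
        have hcS : c ∈ S := List.count_pos_iff.mp (by omega)
        obtain ⟨U, R, rfl, hU⟩ := pvFirstSplit c S hcS
        have hcR : c ∈ R := by
          rw [List.count_append, List.count_cons_self] at hSc
          have hU0 : U.count c = 0 := List.count_eq_zero.mpr hU
          exact List.count_pos_iff.mp (by omega)
        obtain ⟨M, V, rfl, hV⟩ := pvLastSplit c R hcR
        have h1 : (Q' ++ [c]).Sublist (M ++ c :: V) := pvPeelCons c U _ _ hU hsub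
        have h2 : Q'.Sublist M := by
          have hr : (c :: Q'.reverse).Sublist (V.reverse ++ c :: M.reverse) := by
            have := List.reverse_sublist.mpr h1
            simpa using this
          have := pvPeelCons c V.reverse Q'.reverse M.reverse (by simpa using hV) hr
          exact List.reverse_sublist.mp (by simpa using this)
        have hmax' : ∀ t : List Char, t.Sublist M → t.reverse = t → t.length ≤ Q'.length := by
          intro t ht hpt
          have hb1 : (t ++ [c]).Sublist (M ++ c :: V) :=
            List.Sublist.append ht ((List.nil_sublist V).cons₂ c)
          have hb2 : (c :: (t ++ [c])).Sublist (U ++ c :: (M ++ c :: V)) :=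
            List.sublist_append_of_sublist_right (hb1.cons₂ c)
          have := hmax _ hb2 (by simp [hpt])
          simp at this ⊢
          omega
        have hG := ih Q' M (by simp at hlen; omega) hq' h2 hmax'
        exact PvGood.step U M V Q' c hU hV hG

theorem pvGood_of_max (Q : List Char) : ∀ (S : List Char),
    Q.reverse = Q → Q.Sublist S →
    (∀ t : List Char, t.Sublist S → t.reverse = t → t.length ≤ Q.length) →
    PvGood S Q := by
  intro S
  exact pvGood_of_max_aux (Q.length + 1) Q S (by omega)

theorem pvGood_len (W Q : List Char) (h : PvGood W Q) : Q.length ≤ W.length := by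
  induction h with
  | nil => simp
  | single U V c hU hV => simp; omega
  | step U M V Q c hU hV h ih => simp; omega

theorem pvGetD_mid (X Y : List Char) (z : Char) :
    PySem.List.pyGetD (X ++ z :: Y) ((X.length : Int)) '?' = z := by
  rw [PySem.List.pyGetD_natCast]
  simp [List.getD_eq_getElem?_getD, List.getElem?_append_right]

-- the master simulation lemma -------------------------------------------------

theorem pvMain (W Q : List Char) (hG : PvGood W Q) :
    ∀ (PreS SufS PreP SufP : List Char) (res : List (Option Char)) (half : List Char)
      (sl sr kl kr rl rr : Int) (f : Nat),
    Q.length < f →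
    sl = (PreS.length : Int) → sr = sl + W.length - 1 →
    kl = (PreP.length : Int) → kr = kl + Q.length - 1 →
    0 ≤ rl → rr = (res.length : Int) - 1 - rl →
    2 * rl + (2 * (W.length : Int) - Q.length) = (res.length : Int) →
    ∃ h : List Char,
      2 * (h.length : Int) = 2 * (W.length : Int) - Q.length + (Q.length : Int) % 2 ∧
      pvLoopB (PreS ++ W ++ SufS) (PreP ++ Q ++ SufP) f sl sr kl kr half =
        some (half ++ h) ∧
      pvLoopA (PreS ++ W ++ SufS) (PreP ++ Q ++ SufP) f sl sr kl kr rl rr res =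
        some (pvWriteSym res rl h) := by
  induction hG with
  | nil =>
    intro PreS SufS PreP SufP res half sl sr kl kr rl rr f hf hsl hsr hkl hkr hrl hrr hinv
    subst hsl hsr hkl hkr hrr
    obtain ⟨f', rfl⟩ : ∃ f', f = f' + 1 := ⟨f - 1, by omega⟩
    refine ⟨[], by simp, ?_, ?_⟩
    · simp only [pvLoopB]
      rw [if_neg (by simp only [List.length_nil, Nat.cast_zero]; omega)]
      simp
    · simp only [pvLoopA]
      rw [if_neg (by simp only [List.length_nil, Nat.cast_zero]; omega)]
      rfl
  | single U V c hU hV =>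
    intro PreS SufS PreP SufP res half sl sr kl kr rl rr f hf hsl hsr hkl hkr hrl hrr hinv
    subst hsl hsr hkl hkr hrr
    simp only [List.length_cons, List.length_nil, List.length_append] at hf hinv ⊢
    obtain ⟨f', rfl⟩ : ∃ f', f = f' + 1 := ⟨f - 1, by omega⟩
    obtain ⟨f'', rfl⟩ : ∃ f'', f' = f'' + 1 := ⟨f' - 1, by omega⟩
    have hgk : PySem.List.pyGetD (PreP ++ [c] ++ SufP) ((PreP.length : Int)) '?' = c := by
      rw [show PreP ++ [c] ++ SufP = PreP ++ c :: SufP from by simp]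
      exact pvGetD_mid PreP SufP c
    have hkr0 : (PreP.length : Int) + ((0 : Nat) + 1 : Nat) - 1 = (PreP.length : Int) := by
      push_cast; ring
    refine ⟨U ++ V.reverse ++ [c], ?_, ?_, ?_⟩
    · simp only [List.length_append, List.length_reverse, List.length_cons, List.length_nil]
      push_cast
      omega
    · -- B side
      have hidx : pvIdxFrom (PreS ++ (U ++ c :: V) ++ SufS) c ((PreS.length : Int)) =
          some ((PreS.length : Int) + U.length) := by
        rw [show PreS ++ (U ++ c :: V) ++ SufS = PreS ++ U ++ c :: (V ++ SufS) from by simp]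
        exact pvIdxFrom_spec c PreS U (V ++ SufS) hU
      have hrdx : pvRIdxTo (PreS ++ (U ++ c :: V) ++ SufS) c
          ((PreS.length : Int) + ((U.length : Nat) + ((V.length : Nat) + 1) : Nat) - 1) =
          some ((PreS.length : Int) + U.length) := by
        rw [show PreS ++ (U ++ c :: V) ++ SufS = (PreS ++ U) ++ c :: V ++ SufS from by simp]
        rw [show (PreS.length : Int) + ((U.length : Nat) + ((V.length : Nat) + 1) : Nat) - 1 =
          (((PreS ++ U).length : Int)) + V.length from by push_cast; simp; ring]
        rw [pvRIdxTo_spec c (PreS ++ U) V SufS hV]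
        congr 1
        simp
      have hslice1 : PySem.List.slice (PreS ++ (U ++ c :: V) ++ SufS)
          (some ((PreS.length : Int))) (some ((PreS.length : Int) + U.length)) = U := by
        rw [PySem.List.slice_natCast_add]
        rw [show PreS ++ (U ++ c :: V) ++ SufS = PreS ++ ((U ++ c :: V) ++ SufS) from by simp]
        rw [List.drop_left]
        rw [show (U ++ c :: V) ++ SufS = U ++ (c :: V ++ SufS) from by simp]
        rw [List.take_left]
      have hslice2 : PySem.List.slice (PreS ++ (U ++ c :: V) ++ SufS)
          (some ((PreS.length : Int) + U.length + 1))
          (some ((PreS.length : Int) + ((U.length : Nat) + ((V.length : Nat) + 1) : Nat) - 1 + 1)) = V := by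
        rw [show (PreS.length : Int) + (U.length : Int) + 1 = (((PreS ++ U ++ [c]).length : Nat) : Int) from by
          simp; push_cast; ring]
        rw [show (PreS.length : Int) + ((U.length : Nat) + ((V.length : Nat) + 1) : Nat) - 1 + 1 =
          (((PreS ++ U ++ [c]).length : Nat) : Int) + ((V.length : Nat) : Int) from by
          simp; push_cast; ring]
        rw [PySem.List.slice_natCast_add]
        rw [show PreS ++ (U ++ c :: V) ++ SufS = (PreS ++ U ++ [c]) ++ (V ++ SufS) from by simp]
        rw [List.drop_left, List.take_left]
      rw [pvLoopB]
      rw [if_pos (by omega)]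
      rw [hkr0, hgk, hidx, hrdx]
      dsimp only
      rw [pvLoopB]
      rw [if_neg (by omega)]
      rw [hslice1, hslice2]
      simp [List.append_assoc]
    · -- A side
      have hlw : pvLocFwdA (PreS ++ (U ++ c :: V) ++ SufS) c
          (2 * (PreS ++ (U ++ c :: V) ++ SufS).length + 2) ((PreS.length : Int)) =
          some ((PreS.length : Int) + U.length) := by
        rw [show PreS ++ (U ++ c :: V) ++ SufS = PreS ++ U ++ c :: (V ++ SufS) from by simp]
        exact pvLocFwdA_spec c U PreS (V ++ SufS) _ hU (by simp; omega)
      have hbw : pvLocBwdA (PreS ++ (U ++ c :: V) ++ SufS) c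
          (2 * (PreS ++ (U ++ c :: V) ++ SufS).length + 2)
          ((PreS.length : Int) + ((U.length : Nat) + ((V.length : Nat) + 1) : Nat) - 1) =
          some ((PreS.length : Int) + U.length) := by
        rw [show PreS ++ (U ++ c :: V) ++ SufS = (PreS ++ U) ++ c :: V ++ SufS from by simp]
        rw [show (PreS.length : Int) + ((U.length : Nat) + ((V.length : Nat) + 1) : Nat) - 1 =
          (((PreS ++ U).length : Int)) + V.length from by push_cast; simp; ring]
        rw [pvLocBwdA_spec c V (PreS ++ U) SufS _ hV (by simp; omega)]
        simp
      have hgp : PySem.List.pyGetD (PreS ++ (U ++ c :: V) ++ SufS)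
          ((PreS.length : Int) + U.length) '?' = c := by
        rw [show PreS ++ (U ++ c :: V) ++ SufS = (PreS ++ U) ++ c :: (V ++ SufS) from by simp]
        rw [show (PreS.length : Int) + (U.length : Int) = (((PreS ++ U).length : Nat) : Int) from by simp]
        exact pvGetD_mid (PreS ++ U) (V ++ SufS) c
      have hsp : pvSetPartA res rl ((res.length : Int) - 1 - rl)
          (PreS ++ (U ++ c :: V) ++ SufS) ((PreS.length : Int))
          ((PreS.length : Int) + U.length) ((PreS.length : Int) + U.length)
          ((PreS.length : Int) + ((U.length : Nat) + ((V.length : Nat) + 1) : Nat) - 1) =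
          pvWriteSym res rl (U ++ V.reverse) := by
        simp only [pvSetPartA]
        rw [pvFold_pairStep]
        have hm1 : (PySem.List.pyRange ((PreS.length : Int)) ((PreS.length : Int) + U.length) 1).map
            (fun i => PySem.List.pyGetD (PreS ++ (U ++ c :: V) ++ SufS) i '?') = U := by
          rw [show PreS ++ (U ++ c :: V) ++ SufS = PreS ++ U ++ (c :: (V ++ SufS)) from by simp]
          exact pvSegVals U PreS (c :: (V ++ SufS))
        rw [hm1, PySem.List.length_pyRange_one]
        rw [show (((PreS.length : Int) + U.length - (PreS.length : Int)).toNat) = U.length from by omega]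
        rw [PySem.List.pyRange_neg_one_eq_reverse]
        rw [show ((res.length : Int) - 1 - rl - (U.length : Int)) =
          ((pvWriteSym res rl U).length : Int) - 1 - (rl + (U.length : Int)) from by
          rw [pvWriteSym_length]; ring]
        rw [pvFold_pairStep]
        rw [List.map_reverse]
        have hm2 : (PySem.List.pyRange ((PreS.length : Int) + U.length + 1)
            ((PreS.length : Int) + ((U.length : Nat) + ((V.length : Nat) + 1) : Nat) - 1 + 1) 1).map
            (fun i => PySem.List.pyGetD (PreS ++ (U ++ c :: V) ++ SufS) i '?') = V := by
          rw [show ((PreS.length : Int) + (U.length : Int) + 1) =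
            (((PreS ++ U ++ [c]).length : Nat) : Int) from by simp; push_cast; ring]
          rw [show ((PreS.length : Int) + ((U.length : Nat) + ((V.length : Nat) + 1) : Nat) - 1 + 1) =
            (((PreS ++ U ++ [c]).length : Nat) : Int) + ((V.length : Nat) : Int) from by
            simp; push_cast; ring]
          rw [show PreS ++ (U ++ c :: V) ++ SufS = PreS ++ U ++ [c] ++ V ++ SufS from by simp]
          exact pvSegVals V (PreS ++ U ++ [c]) SufS
        rw [hm2]
        rw [← pvWriteSym_append]
      rw [pvLoopA]
      rw [if_pos (by omega)]
      rw [hkr0, hgk, hlw, hbw]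
      dsimp only
      rw [hsp, hgp]
      rw [pvLoopA]
      rw [if_neg (by omega)]
      rw [show pvWriteSym res rl (U ++ V.reverse ++ [c]) =
        pvWriteSym (pvWriteSym res rl (U ++ V.reverse)) (rl + ((U ++ V.reverse).length : Int)) [c]
        from pvWriteSym_append (U ++ V.reverse) [c] res rl]
      simp only [pvWriteSym]
      rw [pvWriteSym_length]
      congr 2
      · push_cast
        simp only [List.length_append, List.length_reverse]
        push_cast
        ring
      · push_cast
        simp only [List.length_append, List.length_reverse]
        push_cast
        ring
  | step U M V Q' c hU hV hg ih =>
    intro PreS SufS PreP SufP res half sl sr kl kr rl rr f hf hsl hsr hkl hkr hrl hrr hinv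
    subst hsl hsr hkl hkr hrr
    simp only [List.length_cons, List.length_nil, List.length_append, Nat.zero_add] at hf hinv ⊢
    obtain ⟨f', rfl⟩ : ∃ f', f = f' + 1 := ⟨f - 1, by omega⟩
    have hgk : PySem.List.pyGetD (PreP ++ (c :: (Q' ++ [c])) ++ SufP) ((PreP.length : Int)) '?' = c := by
      rw [show PreP ++ (c :: (Q' ++ [c])) ++ SufP = PreP ++ c :: ((Q' ++ [c]) ++ SufP) from by simp]
      exact pvGetD_mid PreP ((Q' ++ [c]) ++ SufP) c
    have hgkr : PySem.List.pyGetD (PreP ++ (c :: (Q' ++ [c])) ++ SufP)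
        ((PreP.length : Int) + ((Q'.length : Nat) + 1 + 1 : Nat) - 1) '?' = c := by
      rw [show ((PreP.length : Int) + ((Q'.length : Nat) + 1 + 1 : Nat) - 1) =
        (((PreP ++ c :: Q').length : Nat) : Int) from by simp; push_cast; ring]
      rw [show PreP ++ (c :: (Q' ++ [c])) ++ SufP = (PreP ++ c :: Q') ++ c :: SufP from by simp]
      exact pvGetD_mid (PreP ++ c :: Q') SufP c
    -- the window list, its locates
    have hlw : pvLocFwdA (PreS ++ (U ++ c :: (M ++ c :: V)) ++ SufS) c
        (2 * (PreS ++ (U ++ c :: (M ++ c :: V)) ++ SufS).length + 2) ((PreS.length : Int)) =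
        some ((PreS.length : Int) + U.length) := by
      rw [show PreS ++ (U ++ c :: (M ++ c :: V)) ++ SufS
        = PreS ++ U ++ c :: (M ++ c :: V ++ SufS) from by simp]
      exact pvLocFwdA_spec c U PreS (M ++ c :: V ++ SufS) _ hU (by simp; omega)
    have hbw : pvLocBwdA (PreS ++ (U ++ c :: (M ++ c :: V)) ++ SufS) c
        (2 * (PreS ++ (U ++ c :: (M ++ c :: V)) ++ SufS).length + 2)
        ((PreS.length : Int) + ((U.length : Nat) + ((M.length : Nat) + ((V.length : Nat) + 1) + 1) : Nat) - 1) =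
        some ((PreS.length : Int) + U.length + 1 + M.length) := by
      rw [show PreS ++ (U ++ c :: (M ++ c :: V)) ++ SufS
        = (PreS ++ U ++ [c] ++ M) ++ c :: V ++ SufS from by simp]
      rw [show ((PreS.length : Int) + ((U.length : Nat) + ((M.length : Nat) + ((V.length : Nat) + 1) + 1) : Nat) - 1) =
        (((PreS ++ U ++ [c] ++ M).length : Nat) : Int) + ((V.length : Nat) : Int) from by
        simp; push_cast; ring]
      rw [pvLocBwdA_spec c V (PreS ++ U ++ [c] ++ M) SufS _ hV (by simp; omega)]
      congr 1
      simp
      push_cast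
      ring
    have hgp : PySem.List.pyGetD (PreS ++ (U ++ c :: (M ++ c :: V)) ++ SufS)
        ((PreS.length : Int) + U.length) '?' = c := by
      rw [show PreS ++ (U ++ c :: (M ++ c :: V)) ++ SufS
        = (PreS ++ U) ++ c :: (M ++ c :: V ++ SufS) from by simp]
      rw [show (PreS.length : Int) + (U.length : Int) = (((PreS ++ U).length : Nat) : Int) from by simp]
      exact pvGetD_mid (PreS ++ U) (M ++ c :: V ++ SufS) c
    have hgq : PySem.List.pyGetD (PreS ++ (U ++ c :: (M ++ c :: V)) ++ SufS)
        ((PreS.length : Int) + U.length + 1 + M.length) '?' = c := by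
      rw [show PreS ++ (U ++ c :: (M ++ c :: V)) ++ SufS
        = (PreS ++ U ++ [c] ++ M) ++ c :: (V ++ SufS) from by simp]
      rw [show (PreS.length : Int) + (U.length : Int) + 1 + (M.length : Int) =
        (((PreS ++ U ++ [c] ++ M).length : Nat) : Int) from by simp; push_cast; ring]
      exact pvGetD_mid (PreS ++ U ++ [c] ++ M) (V ++ SufS) c
    have hsp : pvSetPartA res rl ((res.length : Int) - 1 - rl)
        (PreS ++ (U ++ c :: (M ++ c :: V)) ++ SufS) ((PreS.length : Int))
        ((PreS.length : Int) + U.length) ((PreS.length : Int) + U.length + 1 + M.length)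
        ((PreS.length : Int) + ((U.length : Nat) + ((M.length : Nat) + ((V.length : Nat) + 1) + 1) : Nat) - 1) =
        pvWriteSym res rl (U ++ V.reverse) := by
      simp only [pvSetPartA]
      rw [pvFold_pairStep]
      have hm1 : (PySem.List.pyRange ((PreS.length : Int)) ((PreS.length : Int) + U.length) 1).map
          (fun i => PySem.List.pyGetD (PreS ++ (U ++ c :: (M ++ c :: V)) ++ SufS) i '?') = U := by
        rw [show PreS ++ (U ++ c :: (M ++ c :: V)) ++ SufS
          = PreS ++ U ++ (c :: (M ++ c :: V ++ SufS)) from by simp]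
        exact pvSegVals U PreS (c :: (M ++ c :: V ++ SufS))
      rw [hm1, PySem.List.length_pyRange_one]
      rw [show (((PreS.length : Int) + U.length - (PreS.length : Int)).toNat) = U.length from by omega]
      rw [PySem.List.pyRange_neg_one_eq_reverse]
      rw [show ((res.length : Int) - 1 - rl - (U.length : Int)) =
        ((pvWriteSym res rl U).length : Int) - 1 - (rl + (U.length : Int)) from by
        rw [pvWriteSym_length]; ring]
      rw [pvFold_pairStep]
      rw [List.map_reverse]
      have hm2 : (PySem.List.pyRange ((PreS.length : Int) + U.length + 1 + M.length + 1)
          ((PreS.length : Int) + ((U.length : Nat) + ((M.length : Nat) + ((V.length : Nat) + 1) + 1) : Nat) - 1 + 1) 1).map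
          (fun i => PySem.List.pyGetD (PreS ++ (U ++ c :: (M ++ c :: V)) ++ SufS) i '?') = V := by
        rw [show ((PreS.length : Int) + (U.length : Int) + 1 + (M.length : Int) + 1) =
          (((PreS ++ U ++ [c] ++ M ++ [c]).length : Nat) : Int) from by simp; push_cast; ring]
        rw [show ((PreS.length : Int) + ((U.length : Nat) + ((M.length : Nat) + ((V.length : Nat) + 1) + 1) : Nat) - 1 + 1) =
          (((PreS ++ U ++ [c] ++ M ++ [c]).length : Nat) : Int) + ((V.length : Nat) : Int) from by
          simp; push_cast; ring]
        rw [show PreS ++ (U ++ c :: (M ++ c :: V)) ++ SufS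
          = PreS ++ U ++ [c] ++ M ++ [c] ++ V ++ SufS from by simp]
        exact pvSegVals V (PreS ++ U ++ [c] ++ M ++ [c]) SufS
      rw [hm2]
      rw [← pvWriteSym_append]
    -- the inner window via the induction hypothesis
    obtain ⟨h', hlen', hB', hA'⟩ := ih (PreS ++ U ++ [c]) ((c :: V) ++ SufS) (PreP ++ [c])
      ([c] ++ SufP)
      (pvWriteSym res rl (U ++ V.reverse ++ [c])) (half ++ U ++ V.reverse ++ [c])
      ((PreS.length : Int) + U.length + 1) ((PreS.length : Int) + U.length + 1 + M.length - 1)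
      ((PreP.length : Int) + 1) ((PreP.length : Int) + ((Q'.length : Nat) + 1 + 1 : Nat) - 1 - 1)
      (rl + ((U.length : Nat) : Int) + V.length + 1)
      ((res.length : Int) - 1 - (rl + ((U.length : Nat) : Int) + V.length + 1))
      f' (by omega) (by simp <;> push_cast <;> ring) (by push_cast <;> ring) (by simp <;> push_cast <;> ring)
      (by simp <;> push_cast <;> ring) (by omega)
      (by rw [pvWriteSym_length]) (by rw [pvWriteSym_length]; push_cast at hinv ⊢; omega)
    rw [show (PreS ++ U ++ [c]) ++ M ++ ((c :: V) ++ SufS)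
      = PreS ++ (U ++ c :: (M ++ c :: V)) ++ SufS from by simp] at hB' hA'
    rw [show (PreP ++ [c]) ++ Q' ++ ([c] ++ SufP)
      = PreP ++ (c :: (Q' ++ [c])) ++ SufP from by simp] at hB' hA'
    refine ⟨U ++ V.reverse ++ [c] ++ h', ?_, ?_, ?_⟩
    · simp only [List.length_append, List.length_reverse, List.length_cons, List.length_nil] at hlen' ⊢
      push_cast at hlen' ⊢
      omega
    · -- B side
      have hidx : pvIdxFrom (PreS ++ (U ++ c :: (M ++ c :: V)) ++ SufS) c ((PreS.length : Int)) =
          some ((PreS.length : Int) + U.length) := by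
        rw [show PreS ++ (U ++ c :: (M ++ c :: V)) ++ SufS
          = PreS ++ U ++ c :: (M ++ c :: V ++ SufS) from by simp]
        exact pvIdxFrom_spec c PreS U (M ++ c :: V ++ SufS) hU
      have hrdx : pvRIdxTo (PreS ++ (U ++ c :: (M ++ c :: V)) ++ SufS) c
          ((PreS.length : Int) + ((U.length : Nat) + ((M.length : Nat) + ((V.length : Nat) + 1) + 1) : Nat) - 1) =
          some ((PreS.length : Int) + U.length + 1 + M.length) := by
        rw [show PreS ++ (U ++ c :: (M ++ c :: V)) ++ SufS
          = (PreS ++ U ++ [c] ++ M) ++ c :: V ++ SufS from by simp]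
        rw [show ((PreS.length : Int) + ((U.length : Nat) + ((M.length : Nat) + ((V.length : Nat) + 1) + 1) : Nat) - 1) =
          (((PreS ++ U ++ [c] ++ M).length : Nat) : Int) + ((V.length : Nat) : Int) from by
          simp; push_cast; ring]
        rw [pvRIdxTo_spec c (PreS ++ U ++ [c] ++ M) V SufS hV]
        congr 1
        simp
        push_cast
        ring
      have hslice1 : PySem.List.slice (PreS ++ (U ++ c :: (M ++ c :: V)) ++ SufS)
          (some ((PreS.length : Int))) (some ((PreS.length : Int) + U.length)) = U := by
        rw [PySem.List.slice_natCast_add]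
        rw [show PreS ++ (U ++ c :: (M ++ c :: V)) ++ SufS
          = PreS ++ ((U ++ c :: (M ++ c :: V)) ++ SufS) from by simp]
        rw [List.drop_left]
        rw [show (U ++ c :: (M ++ c :: V)) ++ SufS = U ++ (c :: (M ++ c :: V) ++ SufS) from by simp]
        rw [List.take_left]
      have hslice2 : PySem.List.slice (PreS ++ (U ++ c :: (M ++ c :: V)) ++ SufS)
          (some ((PreS.length : Int) + U.length + 1 + M.length + 1))
          (some ((PreS.length : Int) + ((U.length : Nat) + ((M.length : Nat) + ((V.length : Nat) + 1) + 1) : Nat) - 1 + 1)) = V := by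
        rw [show ((PreS.length : Int) + (U.length : Int) + 1 + (M.length : Int) + 1) =
          (((PreS ++ U ++ [c] ++ M ++ [c]).length : Nat) : Int) from by simp; push_cast; ring]
        rw [show ((PreS.length : Int) + ((U.length : Nat) + ((M.length : Nat) + ((V.length : Nat) + 1) + 1) : Nat) - 1 + 1) =
          (((PreS ++ U ++ [c] ++ M ++ [c]).length : Nat) : Int) + ((V.length : Nat) : Int) from by
          simp; push_cast; ring]
        rw [PySem.List.slice_natCast_add]
        rw [show PreS ++ (U ++ c :: (M ++ c :: V)) ++ SufS
          = (PreS ++ U ++ [c] ++ M ++ [c]) ++ (V ++ SufS) from by simp]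
        rw [List.drop_left, List.take_left]
      rw [pvLoopB]
      rw [if_pos (by omega)]
      rw [show ((PreP.length : Int) + ((Q'.length : Nat) + 1 + 1 : Nat) - 1) =
        ((PreP.length : Int) + ((Q'.length : Nat) + 1 + 1 : Nat) - 1) from rfl]
      rw [hgk, hgkr, hidx, hrdx]
      dsimp only
      rw [hslice1, hslice2]
      rw [show ((PreS.length : Int) + (U.length : Int) + 1 + (M.length : Int) - 1) =
        ((PreS.length : Int) + U.length + 1 + M.length - 1) from by ring] at hB'
      rw [hB']
      simp [List.append_assoc]
    · -- A side
      rw [pvLoopA]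
      rw [if_pos (by omega)]
      rw [hgk, hgkr, hlw, hbw]
      dsimp only
      rw [hsp, hgp, hgq]
      rw [show (rl + ((PreS.length : Int) + U.length - (PreS.length : Int)) +
          ((PreS.length : Int) + ((U.length : Nat) + ((M.length : Nat) + ((V.length : Nat) + 1) + 1) : Nat) - 1 -
            ((PreS.length : Int) + U.length + 1 + M.length)) + 1)
        = rl + ((U.length : Nat) : Int) + V.length + 1 from by push_cast; ring]
      rw [show ((res.length : Int) - 1 - rl - ((PreS.length : Int) + U.length - (PreS.length : Int)) -
          ((PreS.length : Int) + ((U.length : Nat) + ((M.length : Nat) + ((V.length : Nat) + 1) + 1) : Nat) - 1 -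
            ((PreS.length : Int) + U.length + 1 + M.length)) - 1)
        = (res.length : Int) - 1 - (rl + ((U.length : Nat) : Int) + V.length + 1) from by push_cast; ring]
      rw [show PySem.List.pySetD (PySem.List.pySetD (pvWriteSym res rl (U ++ V.reverse))
          (rl + ((PreS.length : Int) + U.length - (PreS.length : Int)) +
            ((PreS.length : Int) + ((U.length : Nat) + ((M.length : Nat) + ((V.length : Nat) + 1) + 1) : Nat) - 1 -
              ((PreS.length : Int) + U.length + 1 + M.length))) (some c))
          ((res.length : Int) - 1 - rl - ((PreS.length : Int) + U.length - (PreS.length : Int)) -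
            ((PreS.length : Int) + ((U.length : Nat) + ((M.length : Nat) + ((V.length : Nat) + 1) + 1) : Nat) - 1 -
              ((PreS.length : Int) + U.length + 1 + M.length))) (some c) =
          pvWriteSym res rl (U ++ V.reverse ++ [c]) from by
        rw [show pvWriteSym res rl (U ++ V.reverse ++ [c]) =
          pvWriteSym (pvWriteSym res rl (U ++ V.reverse)) (rl + ((U ++ V.reverse).length : Int)) [c]
          from pvWriteSym_append (U ++ V.reverse) [c] res rl]
        simp only [pvWriteSym]
        rw [pvWriteSym_length]
        rw [show (rl + ((PreS.length : Int) + U.length - (PreS.length : Int)) +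
            ((PreS.length : Int) + ((U.length : Nat) + ((M.length : Nat) + ((V.length : Nat) + 1) + 1) : Nat) - 1 -
              ((PreS.length : Int) + U.length + 1 + M.length)))
          = rl + (((U ++ V.reverse).length : Nat) : Int) from by simp <;> push_cast <;> ring]
        rw [show ((res.length : Int) - 1 - rl - ((PreS.length : Int) + U.length - (PreS.length : Int)) -
            ((PreS.length : Int) + ((U.length : Nat) + ((M.length : Nat) + ((V.length : Nat) + 1) + 1) : Nat) - 1 -
              ((PreS.length : Int) + U.length + 1 + M.length)))
          = (res.length : Int) - 1 - (rl + (((U ++ V.reverse).length : Nat) : Int)) from by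
          simp <;> push_cast <;> ring]]
      rw [show ((PreS.length : Int) + (U.length : Int) + 1 + (M.length : Int) - 1) =
        ((PreS.length : Int) + U.length + 1 + M.length - 1) from by ring] at hA'
      rw [hA']
      rw [show (rl + ((U.length : Nat) : Int) + V.length + 1)
        = rl + (((U ++ V.reverse ++ [c]).length : Nat) : Int) from by simp <;> push_cast <;> ring]
      rw [show pvWriteSym res rl (U ++ V.reverse ++ [c] ++ h') =
        pvWriteSym (pvWriteSym res rl (U ++ V.reverse ++ [c]))
          (rl + (((U ++ V.reverse ++ [c]).length : Nat) : Int)) h'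
        from pvWriteSym_append (U ++ V.reverse ++ [c]) h' res rl]

theorem pvGlueGood (s slps : String) (hG : PvGood s.toList slps.toList) :
    get_palindrome_2 s slps = get_palindrome_2_alt s slps := by
  by_cases hS : s.toList.length = 0
  · simp [get_palindrome_2, get_palindrome_2_alt, hS]
  · have hQW := pvGood_len _ _ hG
    obtain ⟨h, hlen, hB, hA⟩ := pvMain s.toList slps.toList hG [] [] [] []
      (List.replicate ((2 * (s.toList.length : Int) - (slps.toList.length : Int)).toNat)
        (none : Option Char)) []
      0 ((s.toList.length : Int) - 1) 0 ((slps.toList.length : Int) - 1) 0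
      ((((2 * (s.toList.length : Int) - (slps.toList.length : Int)).toNat : Nat) : Int) - 1)
      (slps.toList.length + 1) (by omega) (by simp) (by ring) (by simp) (by ring) (by omega)
      (by simp only [List.length_replicate]; ring) (by simp only [List.length_replicate]; omega)
    simp only [List.nil_append, List.append_nil] at hB hA
    simp only [get_palindrome_2, get_palindrome_2_alt]
    rw [if_neg hS, if_neg hS]
    rw [hA, hB]
    dsimp only
    have hK : 2 * h.length = (2 * (s.toList.length : Int) - (slps.toList.length : Int)).toNat ∨
        2 * h.length = (2 * (s.toList.length : Int) - (slps.toList.length : Int)).toNat + 1 := by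
      omega
    rw [pvJoinWriteSym h _ hK]
    dsimp only
    congr 1
    rw [PySem.List.slice_from h.reverse (show (0 : Int) ≤ 2 * (h.length : Int) -
      (2 * (s.toList.length : Int) - (slps.toList.length : Int)) from by omega)]
    rw [show (2 * (h.length : Int) - (2 * (s.toList.length : Int) - (slps.toList.length : Int))).toNat
      = 2 * h.length - (2 * (s.toList.length : Int) - (slps.toList.length : Int)).toNat from by
      omega]

-- ===== VERDICT (by name: the statement is the Claim_ definition above) =====
theorem get_palindrome_2_spec : Claim_equal_get_palindrome_2 := by
  intro s slps _ hpre
  unfold Spec_get_palindrome_2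
  rcases hpre with hS | ⟨h1, h2⟩ | ⟨hpal, hsub, hmax⟩
  · simp [get_palindrome_2, get_palindrome_2_alt, hS]
  · obtain ⟨c, hc⟩ : ∃ c, slps.toList = [c] := by
      cases hq : slps.toList with
      | nil => rw [hq] at h1; simp at h1
      | cons c T =>
        rw [hq] at h1
        simp at h1
        exact ⟨c, by simp [h1]⟩
    rw [hc] at h2
    simp only [List.headD_cons] at h2
    exact (pvGlueGood s slps (hc ▸ pvGood_of_count_one c s.toList h2)).symm ▸ rfl
  · by_cases hS : s.toList = []
    · simp [get_palindrome_2, get_palindrome_2_alt, hS]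
    · have hG := pvGood_of_max slps.toList s.toList hpal (List.mem_sublists.mp hsub)
        (fun t ht hp => hmax t (List.mem_sublists.mpr ht) hp)
      exact pvGlueGood s slps hG
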